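-- pv_equiv track=rewrite | github.com/pvsnp9/beyond_detection | src/utils/mdpo_utils.py | _is_consecutive_ids
-- ===== SOURCE A (Python) =====
-- from typing import Any, Dict, Iterable, List, Optional, Tuple
--
-- def _is_consecutive_ids(visual_facts: Any) -> bool:
--     if not isinstance(visual_facts, list):
--         return False
--     ids = []
--     for fact in visual_facts:
--         if not isinstance(fact, dict):
--             return False
--         if "id" not in fact:
--             return False
--         ids.append(fact["id"])
--     if not ids:
--         return True
--     try:
--         ids = [int(i) for i in ids]
--     except Exception:
--         return False
--     return ids == list(range(0, len(ids)))
-- ===== SOURCE B (Python) =====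
-- def _is_consecutive_ids(visual_facts):
--     if not isinstance(visual_facts, list):
--         return False
--     for i, fact in enumerate(visual_facts):
--         if not isinstance(fact, dict):
--             return False
--         if "id" not in fact:
--             return False
--         try:
--             v = int(fact["id"])
--         except Exception:
--             return False
--         if v != i:
--             return False
--     return True
-- ===== Notes on version B (the rewrite author's own statement) =====
-- stated objective: simpler
-- what changed: Single enumerate pass that checks each fact's id against its index and short-circuits, instead of collecting all ids, converting them, and comparing the list to list(range(len(ids))).
import Mathlib
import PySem

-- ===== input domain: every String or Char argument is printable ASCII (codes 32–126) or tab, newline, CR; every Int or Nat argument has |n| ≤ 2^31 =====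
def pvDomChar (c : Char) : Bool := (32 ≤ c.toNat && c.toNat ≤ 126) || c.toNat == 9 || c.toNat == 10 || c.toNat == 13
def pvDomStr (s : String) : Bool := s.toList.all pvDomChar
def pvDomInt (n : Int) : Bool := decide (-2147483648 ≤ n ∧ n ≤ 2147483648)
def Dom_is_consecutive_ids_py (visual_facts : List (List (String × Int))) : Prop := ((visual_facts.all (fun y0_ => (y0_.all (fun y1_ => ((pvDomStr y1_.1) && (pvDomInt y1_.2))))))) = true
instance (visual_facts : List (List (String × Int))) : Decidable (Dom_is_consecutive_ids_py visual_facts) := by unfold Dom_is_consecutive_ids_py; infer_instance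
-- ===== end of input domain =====

-- B replaces A's collect-then-convert-then-compare-to-range phases by one enumerate pass
-- checking each id against its index (objective: simpler). Return values only; no mutation.

-- ===== PORT A =====
-- the 'for fact in visual_facts: … ids.append(fact["id"])' loop; 'none' = a fact without "id" (early False).
-- On the Lean type every fact IS a dict (isinstance always true) and ids are Int (int(i) is the identity,
-- the try/except never fires), so those branches are vacuous here.
def pvCollectIds : List (List (String × Int)) → Option (List Int)
  | [] => some []
  | f :: rest =>
    match (PySem.Dict.mk f).get? "id" with
    | none => none
    | some v => (pvCollectIds rest).map (fun l => v :: l)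

def is_consecutive_ids_py (visual_facts : List (List (String × Int))) : Bool :=
  match pvCollectIds visual_facts with
  | none => false
  | some ids =>
    if ids.isEmpty then true
    else decide (ids = PySem.List.pyRange 0 ids.length 1)

-- ===== PORT B =====
-- the 'for i, fact in enumerate(visual_facts)' loop of Source B, carrying the index i.
def pvAltGo : List (List (String × Int)) → Int → Bool
  | [], _ => true
  | f :: rest, i =>
    match (PySem.Dict.mk f).get? "id" with
    | none => false
    | some v => if v ≠ i then false else pvAltGo rest (i + 1)

def is_consecutive_ids_py_alt (visual_facts : List (List (String × Int))) : Bool :=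
  pvAltGo visual_facts 0

-- ===== PRECONDITION & SPEC =====
def Spec_is_consecutive_ids_py (visual_facts : List (List (String × Int))) (out : Bool) : Prop := out = is_consecutive_ids_py_alt visual_facts
instance (visual_facts : List (List (String × Int))) (out : Bool) : Decidable (Spec_is_consecutive_ids_py visual_facts out) := by unfold Spec_is_consecutive_ids_py; infer_instance

-- ===== CLAIM (what is proved, stated in full; the proofs are below) =====
def Claim_equal_is_consecutive_ids_py : Prop := ∀ (visual_facts : List (List (String × Int))), Dom_is_consecutive_ids_py visual_facts → Spec_is_consecutive_ids_py visual_facts (is_consecutive_ids_py visual_facts)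

-- ===== LEMMAS AND PROOFS =====

-- B's indexed loop equals "collected ids = the arithmetic progression starting at i".
theorem pvAltGo_eq (vf : List (List (String × Int))) : ∀ (i : Int),
    pvAltGo vf i =
      (match pvCollectIds vf with
       | none => false
       | some ids => decide (ids = (List.range ids.length).map (fun (k : Nat) => i + (k : Int)))) := by
  induction vf with
  | nil => intro i; simp [pvAltGo, pvCollectIds]
  | cons f rest ih =>
    intro i
    simp only [pvAltGo, pvCollectIds]
    cases h : (PySem.Dict.mk f).get? "id" with
    | none => rfl
    | some v =>
      cases hc : pvCollectIds rest with
      | none =>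
        have := ih (i + 1)
        rw [hc] at this
        simp [this]
      | some l =>
        have ihh := ih (i + 1)
        rw [hc] at ihh
        simp only [Option.map_some]
        rw [ihh]
        have hrange : (List.range (l.length + 1)).map (fun (k : Nat) => i + (k : Int))
            = i :: (List.range l.length).map (fun (k : Nat) => (i + 1) + (k : Int)) := by
          rw [List.range_succ_eq_map, List.map_cons, List.map_map]
          refine congrArg₂ _ (by simp) (List.map_congr_left ?_)
          intro k _
          simp [Function.comp, Nat.succ_eq_add_one]
          ring
        rw [List.length_cons, hrange]
        by_cases hv : v = i
        · subst hv
          simp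
        · simp [hv]

-- ===== VERDICT (by name: the statement is the Claim_ definition above) =====
theorem is_consecutive_ids_py_spec : Claim_equal_is_consecutive_ids_py := by
  intro vf _
  unfold Spec_is_consecutive_ids_py is_consecutive_ids_py is_consecutive_ids_py_alt
  rw [pvAltGo_eq]
  cases hc : pvCollectIds vf with
  | none => rfl
  | some ids =>
    simp only
    rw [PySem.List.pyRange_one]
    by_cases he : ids = []
    · subst he; simp
    · simp only [List.isEmpty_iff, he, if_false]
      congr 2
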